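-- pv_equiv track=rewrite | github.com/CheeseTheMonkey/AdventOfCode | 2024/day07.py | can_make
-- ===== SOURCE A (Python) =====
-- def can_make(result, operands, try_concat=False):
--     if len(operands) == 1:
--         return result == operands[0]
--
--     last = operands[-1]
--
--     # Check if it's possible to get the result be multiplying this value:
--     if result % last == 0:
--         can_mul = can_make(result // last, operands[:-1], try_concat)
--     else:
--         can_mul = False
--
--     # for concatenation, we can use powers of 10 greater than out last number, as that's what the next to last number becomes
--     # a || b == (a*power of 10 up from b) + b
--     pow_of_10 = 10 ** len(str(last))
--     if try_concat and (result - last) % pow_of_10 == 0: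
--         can_concat = can_make((result - last) // pow_of_10, operands[:-1], try_concat)
--     else:
--         can_concat = False
--
--     can_add = can_make(result - last, operands[:-1], try_concat)
--     return can_add or can_mul or can_concat
-- ===== SOURCE B (Python) =====
-- def can_make(result, operands, try_concat=False):
--     reachable = {operands[0]}
--     for op in operands[1:]:
--         p = 10 ** len(str(op))
--         nxt = set()
--         for v in reachable:
--             nxt.add(v + op)
--             nxt.add(v * op)
--             if try_concat:
--                 nxt.add(v * p + op)
--         reachable = nxt
--     return result in reachable
-- ===== Notes on version B (the rewrite author's own statement) =====
-- stated objective: alternative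
-- what changed: Replaces A's divisibility-pruned backward recursion (peeling the last operand and dividing/subtracting) with a forward left-to-right frontier: a set of all reachable values is grown operand by operand with +, * and concatenation (v*10^len(str(op))+op), and the answer is a final membership test.
import Mathlib
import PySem

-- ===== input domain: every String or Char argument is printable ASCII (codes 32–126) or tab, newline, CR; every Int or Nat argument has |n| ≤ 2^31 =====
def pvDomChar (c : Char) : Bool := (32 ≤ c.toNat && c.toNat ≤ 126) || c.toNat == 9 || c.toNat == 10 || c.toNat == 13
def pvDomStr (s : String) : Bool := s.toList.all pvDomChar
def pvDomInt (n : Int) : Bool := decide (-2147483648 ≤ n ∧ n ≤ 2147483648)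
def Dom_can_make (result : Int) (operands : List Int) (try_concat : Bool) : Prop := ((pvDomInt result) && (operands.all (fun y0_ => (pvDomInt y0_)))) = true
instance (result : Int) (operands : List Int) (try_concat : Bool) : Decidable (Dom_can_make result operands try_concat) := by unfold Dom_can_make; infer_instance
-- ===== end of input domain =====

-- B replaces A's divisibility-pruned backward recursion by a forward reachable-value
-- set walked left-to-right (objective: alternative algorithm of similar cost).

-- ===== PORT A =====
-- Literal port of A. operands[-1]/operands[0] via getLast?/headI (exact on the reached
-- branches), operands[:-1] = dropLast (exact for every list). The `none` and `last = 0`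
-- branches are Python's IndexError / ZeroDivisionError, excluded by Pre_can_make.
def can_make (result : Int) (operands : List Int) (try_concat : Bool) : Bool :=
  if operands.length = 1 then
    decide (result = operands.headI)
  else
    match h : operands.getLast? with
    | none => false            -- IndexError: operands = [] (outside Pre_)
    | some last =>
      if last = 0 then false   -- ZeroDivisionError on result % last (outside Pre_)
      else
        let can_mul :=
          if PySem.Int.mod result last = 0 then
            can_make (PySem.Int.floordiv result last) operands.dropLast try_concat
          else false
        let pow_of_10 : Int := (10 : Int) ^ (PySem.Int.toChars last).length
        let can_concat :=
          if try_concat = true ∧ PySem.Int.mod (result - last) pow_of_10 = 0 then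
            can_make (PySem.Int.floordiv (result - last) pow_of_10) operands.dropLast try_concat
          else false
        let can_add := can_make (result - last) operands.dropLast try_concat
        can_add || can_mul || can_concat
termination_by operands.length
decreasing_by
  all_goals
    have hne : operands ≠ [] := by
      intro e; rw [e] at h; simp at h
    have := List.length_pos_iff.mpr hne
    simp [List.length_dropLast]; omega

-- ===== PORT B =====
-- port of the forward step over one operand: for each reachable v, add v+op, v*op and
-- (when try_concat) v*10^len(str(op))+op to the next frontier set.
def cmStep (try_concat : Bool) (S : List Int) (op : Int) : List Int :=
  let p : Int := (10 : Int) ^ (PySem.Int.toChars op).length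
  S.foldl (fun T v =>
    let T1 := PySem.Set.add T (v + op)
    let T2 := PySem.Set.add T1 (v * op)
    if try_concat then PySem.Set.add T2 (v * p + op) else T2) PySem.Set.empty

def can_make_alt (result : Int) (operands : List Int) (try_concat : Bool) : Bool :=
  match operands with
  | [] => false                -- IndexError on operands[0] (outside Pre_)
  | o :: rest =>
    decide (result ∈ rest.foldl (cmStep try_concat) (PySem.Set.ofList [o]))

-- ===== PRECONDITION & SPEC =====
-- Pre_ excludes exactly the inputs where A raises: empty operand lists (IndexError)
-- and lists with a 0 after the first element (ZeroDivisionError in result % last).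
def Pre_can_make (result : Int) (operands : List Int) (try_concat : Bool) : Prop :=
  operands ≠ [] ∧ ∀ x ∈ operands.drop 1, x ≠ 0
instance (result : Int) (operands : List Int) (try_concat : Bool) : Decidable (Pre_can_make result operands try_concat) := by unfold Pre_can_make; infer_instance

def pvWitness_can_make : Int × List Int × Bool := (292, [11, 6, 16, 20], false)

def Spec_can_make (result : Int) (operands : List Int) (try_concat : Bool) (out : Bool) : Prop := out = can_make_alt result operands try_concat
instance (result : Int) (operands : List Int) (try_concat : Bool) (out : Bool) : Decidable (Spec_can_make result operands try_concat out) := by unfold Spec_can_make; infer_instance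

-- ===== CLAIM (what is proved, stated in full; the proofs are below) =====
def Claim_equal_can_make : Prop := ∀ (result : Int) (operands : List Int) (try_concat : Bool), Dom_can_make result operands try_concat → Pre_can_make result operands try_concat → Spec_can_make result operands try_concat (can_make result operands try_concat)


-- ===== LEMMAS AND PROOFS =====

-- membership in the inner fold of cmStep
lemma mem_cmStep_foldl (tc : Bool) (op p : Int) (S : List Int) (T0 : List Int) (r : Int) :
    r ∈ S.foldl (fun T v =>
        let T1 := PySem.Set.add T (v + op)
        let T2 := PySem.Set.add T1 (v * op)
        if tc then PySem.Set.add T2 (v * p + op) else T2) T0 ↔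
      r ∈ T0 ∨ ∃ v ∈ S, r = v + op ∨ r = v * op ∨ (tc = true ∧ r = v * p + op) := by
  induction S generalizing T0 with
  | nil => simp
  | cons a S ih =>
    simp only [List.foldl_cons, ih]
    cases tc <;>
      simp [PySem.Set.mem_add, List.mem_cons] <;>
      constructor <;> rintro h <;> aesop

lemma mem_cmStep (tc : Bool) (op : Int) (S : List Int) (r : Int) :
    r ∈ cmStep tc S op ↔
      ∃ v ∈ S, r = v + op ∨ r = v * op ∨
        (tc = true ∧ r = v * ((10 : Int) ^ (PySem.Int.toChars op).length) + op) := by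
  unfold cmStep
  rw [mem_cmStep_foldl]
  simp [PySem.Set.empty]

-- exact-division characterisations used to relate A's backward tests to membership
lemma eq_mul_iff (r v op : Int) (hop : op ≠ 0) :
    r = v * op ↔ PySem.Int.mod r op = 0 ∧ v = PySem.Int.floordiv r op := by
  constructor
  · rintro rfl
    have hd : op ∣ v * op := dvd_mul_left op v
    have hm : PySem.Int.mod (v * op) op = 0 := (PySem.Int.mod_eq_zero_iff_dvd _ _).mpr hd
    refine ⟨hm, ?_⟩
    have := PySem.Int.floordiv_mul_add_mod (v * op) op
    rw [hm, add_zero] at this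
    exact (mul_right_cancel₀ hop this.symm)
  · rintro ⟨hm, rfl⟩
    have := PySem.Int.floordiv_mul_add_mod r op
    rw [hm, add_zero] at this
    exact this.symm

-- the reachable set of a nonempty operand list
def cmReach (tc : Bool) : List Int → List Int
  | [] => []
  | o :: rest => rest.foldl (cmStep tc) (PySem.Set.ofList [o])

lemma cmReach_concat (tc : Bool) (init : List Int) (op : Int) (h : init ≠ []) :
    cmReach tc (init ++ [op]) = cmStep tc (cmReach tc init) op := by
  obtain ⟨o, rest, rfl⟩ := List.exists_cons_of_ne_nil h
  simp [cmReach, List.foldl_append]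

lemma can_make_mem (operands : List Int) :
    ∀ (r : Int) (tc : Bool), operands ≠ [] → (∀ x ∈ operands.drop 1, x ≠ 0) →
      (can_make r operands tc = true ↔ r ∈ cmReach tc operands) := by
  induction operands using List.reverseRecOn with
  | nil => intro r tc h; exact absurd rfl h
  | append_singleton init op ih =>
    intro r tc _ hz
    by_cases hinit : init = []
    · subst hinit
      rw [can_make]
      simp [cmReach, PySem.Set.ofList, PySem.Set.add, PySem.Set.empty, List.headI, eq_comm]
    · -- length ≥ 2
      have hlen2 : 2 ≤ (init ++ [op]).length := by
        have := List.length_pos_iff.mpr hinit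
        simp; omega
      have hop : op ≠ 0 := by
        apply hz
        have : op ∈ (init ++ [op]).drop 1 := by
          obtain ⟨a, t, rfl⟩ := List.exists_cons_of_ne_nil hinit
          simp
        exact this
      have hztail : ∀ x ∈ init.drop 1, x ≠ 0 := by
        intro x hx
        apply hz
        obtain ⟨a, t, rfl⟩ := List.exists_cons_of_ne_nil hinit
        simp at hx ⊢
        exact Or.inl hx
      have ihr := fun r => ih r tc hinit hztail
      rw [can_make]
      have hlast : (init ++ [op]).getLast? = some op := by simp
      have hdrop : (init ++ [op]).dropLast = init := by simp
      have hlne : ¬ (init ++ [op]).length = 1 := by omega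
      rw [if_neg hlne]
      split
      next heq => rw [hlast] at heq; cases heq
      next last heq =>
      rw [hlast] at heq
      injection heq with heq
      subst heq
      rw [hdrop, if_neg hop]
      rw [cmReach_concat tc init op hinit, mem_cmStep]
      set p : Int := (10 : Int) ^ (PySem.Int.toChars op).length with hp
      have hppos : p ≠ 0 := by positivity
      constructor
      · intro hA
        simp only [Bool.or_eq_true] at hA
        rcases hA with (hadd | hmul) | hcc
        · exact ⟨r - op, (ihr _).mp hadd, by left; ring⟩
        · split_ifs at hmul with hm
          · exact ⟨PySem.Int.floordiv r op, (ihr _).mp hmul,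
              by right; left; exact ((eq_mul_iff r _ op hop).mpr ⟨hm, rfl⟩)⟩
        · split_ifs at hcc with hc
          · refine ⟨PySem.Int.floordiv (r - op) p, (ihr _).mp hcc, ?_⟩
            right; right
            refine ⟨hc.1, ?_⟩
            have := (eq_mul_iff (r - op) _ p hppos).mpr ⟨hc.2, rfl⟩
            omega
      · rintro ⟨v, hv, hcase⟩
        simp only [Bool.or_eq_true]
        rcases hcase with h1 | h2 | h3
        · left; left
          exact (ihr _).mpr (by rw [h1]; simpa using hv)
        · left; right
          obtain ⟨hm, hveq⟩ := (eq_mul_iff r v op hop).mp h2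
          rw [if_pos hm]
          exact (ihr _).mpr (hveq ▸ hv)
        · right
          obtain ⟨htc, heq⟩ := h3
          have h2' : r - op = v * p := by omega
          obtain ⟨hm, hveq⟩ := (eq_mul_iff (r - op) v p hppos).mp h2'
          rw [if_pos ⟨htc, hm⟩]
          exact (ihr _).mpr (hveq ▸ hv)

-- ===== VERDICT (by name: the statement is the Claim_ definition above) =====
theorem can_make_spec : Claim_equal_can_make := by
  intro r ops tc _ hpre
  obtain ⟨hne, hz⟩ := hpre
  unfold Spec_can_make
  have hmem := can_make_mem ops r tc hne hz
  obtain ⟨o, rest, rfl⟩ := List.exists_cons_of_ne_nil hne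
  unfold can_make_alt
  by_cases h : can_make r (o :: rest) tc = true
  · rw [h]
    have := hmem.mp h
    simp [cmReach] at this
    simp [this]
  · rw [Bool.not_eq_true] at h
    rw [h]
    have : r ∉ cmReach tc (o :: rest) := fun hm => by
      rw [← hmem] at hm; rw [h] at hm; exact Bool.false_ne_true hm
    simp [cmReach] at this
    simp [this]
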